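-- pv_equiv track=rewrite | github.com/Akshat-Gup/UBS-coding-challenge | app/investigate.py | find_extra_channels
-- ===== SOURCE A (Python) =====
-- from typing import Dict, Any, List, Set, Tuple
--
-- def find_extra_channels(network_data: List[Dict[str, str]]) -> List[Dict[str, str]]:
--     """
--     Find extra channels in a spy network that can be safely removed.
--
--     The goal is to find all edges that are redundant - i.e., if removed,
--     the graph would still be connected. This means finding all edges that
--     are part of cycles.
--
--     Args:
--         network_data: List of dictionaries with spy1 and spy2 keys representing connections
--
--     Returns:
--         List of extra channel connections that can be removed while maintaining connectivity
--     """
--     if not network_data: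
--         return []
--
--     # Build adjacency list representation of the graph
--     graph = {}
--     all_edges = []
--
--     for connection in network_data:
--         spy1 = connection.get('spy1', '')
--         spy2 = connection.get('spy2', '')
--
--         if spy1 and spy2:
--             # Add to graph
--             if spy1 not in graph:
--                 graph[spy1] = []
--             if spy2 not in graph:
--                 graph[spy2] = []
--
--             graph[spy1].append(spy2)
--             graph[spy2].append(spy1)
--             all_edges.append(connection)
--
--     if not all_edges:
--         return []
--
--     # Get all unique nodes
--     all_nodes = set(graph.keys())
--
--     # For each edge, check if removing it would disconnect the graph
--     extra_channels = []
--
--     for edge_to_test in all_edges: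
--         spy1 = edge_to_test['spy1']
--         spy2 = edge_to_test['spy2']
--
--         # Create temporary graph without this edge
--         temp_graph = {}
--         for node in graph:
--             temp_graph[node] = []
--             for neighbor in graph[node]:
--                 # Skip the edge we're testing
--                 if (node == spy1 and neighbor == spy2) or (node == spy2 and neighbor == spy1):
--                     continue
--                 temp_graph[node].append(neighbor)
--
--         # Check if graph is still connected without this edge
--         if is_connected(temp_graph, all_nodes):
--             # This edge can be removed while maintaining connectivity
--             extra_channels.append(edge_to_test)
--
--     return extra_channels
--
-- def is_connected(graph: Dict[str, List[str]], all_nodes: Set[str]) -> bool: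
--     """
--     Check if the graph is connected using DFS.
--
--     Args:
--         graph: Adjacency list representation
--         all_nodes: Set of all nodes that should be reachable
--
--     Returns:
--         True if graph is connected, False otherwise
--     """
--     if not all_nodes:
--         return True
--
--     # Start DFS from any node
--     start_node = next(iter(all_nodes))
--     visited = set()
--     stack = [start_node]
--
--     while stack:
--         node = stack.pop()
--         if node in visited:
--             continue
--
--         visited.add(node)
--
--         for neighbor in graph.get(node, []):
--             if neighbor not in visited:
--                 stack.append(neighbor)
--
--     # Check if all nodes were visited
--     return len(visited) == len(all_nodes)
-- ===== SOURCE B (Python) =====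
-- # B: no per-edge DFS over an adjacency dict; instead a per-distinct-pair (memoised)
-- # level-saturation connectivity check run directly over the endpoint-pair list.
-- from typing import Dict, List
--
--
-- def find_extra_channels(network_data: List[Dict[str, str]]) -> List[Dict[str, str]]:
--     conns, pairs, nodes, seen = [], [], [], set()
--     for conn in network_data:
--         u = conn.get('spy1', '')
--         v = conn.get('spy2', '')
--         if u and v:
--             conns.append(conn)
--             pairs.append((u, v))
--             for s in (u, v):
--                 if s not in seen:
--                     seen.add(s)
--                     nodes.append(s)
--
--     removable = {}
--     out = []
--     for conn, (u, v) in zip(conns, pairs):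
--         key = (u, v) if u <= v else (v, u)
--         if key not in removable:
--             rest = [p for p in pairs
--                     if (p if p[0] <= p[1] else (p[1], p[0])) != key]
--             removable[key] = _spans(rest, nodes)
--         if removable[key]:
--             out.append(conn)
--     return out
--
--
-- def _spans(pairs, nodes):
--     # does the pair list connect nodes[0] to every node? (saturation, no DFS)
--     visited = {nodes[0]}
--     for _ in range(len(nodes)):
--         before = len(visited)
--         for x, y in pairs:
--             if x in visited:
--                 visited.add(y)
--             if y in visited:
--                 visited.add(x)
--         if len(visited) == before:
--             break
--     return all(n in visited for n in nodes)
-- ===== Notes on version B (the rewrite author's own statement) =====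
-- stated objective: alternative
-- what changed: B replaces A's per-edge stack-DFS connectivity test over a rebuilt adjacency dict by a memoised per-distinct-canonical-pair check that saturates a visited set level-by-level directly over the endpoint-pair list (no adjacency structure, no stack, no DFS); Pre_ excludes only association lists that bind 'spy1' or 'spy2' twice inside one record, which represent no Python dict.
import Mathlib
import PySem

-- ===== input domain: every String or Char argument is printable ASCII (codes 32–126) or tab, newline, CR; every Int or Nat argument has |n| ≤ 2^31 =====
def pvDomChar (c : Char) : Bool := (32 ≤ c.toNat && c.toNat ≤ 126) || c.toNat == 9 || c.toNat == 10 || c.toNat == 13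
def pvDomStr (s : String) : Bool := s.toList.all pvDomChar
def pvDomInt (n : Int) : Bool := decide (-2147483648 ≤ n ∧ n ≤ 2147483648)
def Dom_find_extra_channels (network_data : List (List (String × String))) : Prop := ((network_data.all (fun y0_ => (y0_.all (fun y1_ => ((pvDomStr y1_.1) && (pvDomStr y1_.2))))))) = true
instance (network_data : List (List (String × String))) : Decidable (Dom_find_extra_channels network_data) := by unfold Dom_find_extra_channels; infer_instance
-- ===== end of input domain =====

-- B replaces A's per-edge stack-DFS over a rebuilt adjacency dict by a memoised
-- per-distinct-canonical-pair check that saturates a visited set directly over the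
-- endpoint-pair list (no adjacency structure, no stack) — objective: alternative.

-- ===== PORT A =====

-- conn.get(k, '') / conn[k] on an association list (first match; conn[k] is only reached by A on
-- edges whose key is present with a non-empty value, so the '' default is exact there)
def pyGetStr (conn : List (String × String)) (k : String) : String :=
  (((conn.find? (fun p => p.1 == k)).map Prod.snd).getD "")

-- the DFS loop of is_connected; the top of the Python stack (= list end) is the HEAD here, so a
-- Python `for nb in …: stack.append(nb)` becomes `(…).reverse ++ stack`.  The fuel argument is a
-- totality guard only: each iteration pops one element, and at most 1 + Σ degrees = 1 + 2·#edges
-- elements are ever pushed, so the fuel passed by the callers (2·#edges + 2) is never exhausted.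
def isConnLoop (g : PySem.Dict String (List String)) : Nat → PySem.Set String → List String → PySem.Set String
  | 0, visited, _ => visited
  | _ + 1, visited, [] => visited
  | fuel + 1, visited, node :: stack =>
    if PySem.Set.contains visited node then
      isConnLoop g fuel visited stack
    else
      let visited' := PySem.Set.add visited node
      isConnLoop g fuel visited'
        (((g.getD node []).filter (fun nb => !PySem.Set.contains visited' nb)).reverse ++ stack)

-- is_connected(graph, all_nodes): the start node is the first element of the insertion-ordered set
def isConn (fuel : Nat) (g : PySem.Dict String (List String)) (allNodes : PySem.Set String) : Bool :=
  match allNodes with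
  | [] => true
  | start :: _ => (isConnLoop g fuel PySem.Set.empty [start]).length == allNodes.length

-- the body of A's first loop: build the adjacency dict and collect all_edges
def stepA (st : PySem.Dict String (List String) × List (List (String × String)))
    (conn : List (String × String)) :
    PySem.Dict String (List String) × List (List (String × String)) :=
  let spy1 := pyGetStr conn "spy1"
  let spy2 := pyGetStr conn "spy2"
  if spy1 != "" && spy2 != "" then
    let g0 := st.1
    let g1 := if g0.contains spy1 then g0 else g0.insert spy1 []
    let g2 := if g1.contains spy2 then g1 else g1.insert spy2 []
    let g3 := g2.modify spy1 [] (fun l => l ++ [spy2])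
    let g4 := g3.modify spy2 [] (fun l => l ++ [spy1])
    (g4, st.2 ++ [conn])
  else st

-- A's temp_graph for the tested edge: for node in graph (= the items list, in insertion order),
-- keep the neighbours that are not an occurrence of the tested edge
def tempOf (graph : PySem.Dict String (List String)) (spy1 spy2 : String) :
    PySem.Dict String (List String) :=
  graph.items.foldl (fun t p =>
    t.insert p.1 (p.2.foldl (fun acc nb =>
      if (p.1 == spy1 && nb == spy2) || (p.1 == spy2 && nb == spy1) then acc
      else acc ++ [nb]) [])) PySem.Dict.empty

def find_extra_channels (network_data : List (List (String × String))) :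
    List (List (String × String)) :=
  if network_data = [] then [] else
  let built := network_data.foldl stepA (PySem.Dict.empty, [])
  let graph := built.1
  let all_edges := built.2
  if all_edges = [] then [] else
  let all_nodes : PySem.Set String := PySem.Set.ofList graph.keys
  all_edges.foldl (fun extra edge =>
    if isConn (2 * all_edges.length + 2)
        (tempOf graph (pyGetStr edge "spy1") (pyGetStr edge "spy2")) all_nodes then
      extra ++ [edge]
    else extra) []

-- ===== PORT B =====

-- key = (u, v) if u <= v else (v, u)
def canonPair (u v : String) : String × String := if u ≤ v then (u, v) else (v, u)

-- the body of B's first loop: collect the kept connections, their endpoint pairs, and the nodes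
def stepB (st : List (List (String × String)) × List (String × String) × PySem.Set String)
    (conn : List (String × String)) :
    List (List (String × String)) × List (String × String) × PySem.Set String :=
  let u := pyGetStr conn "spy1"
  let v := pyGetStr conn "spy2"
  if u != "" && v != "" then
    (st.1 ++ [conn], st.2.1 ++ [(u, v)], PySem.Set.add (PySem.Set.add st.2.2 u) v)
  else st

-- one saturation pass of _spans: `for x, y in pairs: if x in visited: add(y); if y in visited: add(x)`
def satStep (pairs : List (String × String)) (v : PySem.Set String) : PySem.Set String :=
  pairs.foldl (fun v p =>
    let v1 := if PySem.Set.contains v p.1 then PySem.Set.add v p.2 else v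
    if PySem.Set.contains v1 p.2 then PySem.Set.add v1 p.1 else v1) v

-- the `for _ in range(len(nodes)): … if len(visited) == before: break` loop of _spans
def satRun (pairs : List (String × String)) : Nat → PySem.Set String → PySem.Set String
  | 0, v => v
  | k + 1, v =>
    let v' := satStep pairs v
    if v'.length == v.length then v' else satRun pairs k v'

-- _spans(pairs, nodes); the [] branch is unreachable (every caller passes a nonempty node list)
def spans (pairs : List (String × String)) (nodes : List String) : Bool :=
  match nodes with
  | [] => true
  | n0 :: _ =>
    nodes.all (fun n =>
      PySem.Set.contains (satRun pairs nodes.length (PySem.Set.add PySem.Set.empty n0)) n)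

-- the body of B's main loop over zip(conns, pairs): memoise per canonical key, emit kept conns
def memoStepB (pairs : List (String × String)) (nodes : PySem.Set String)
    (st : PySem.Dict (String × String) Bool × List (List (String × String)))
    (ce : List (String × String) × String × String) :
    PySem.Dict (String × String) Bool × List (List (String × String)) :=
  let key := canonPair ce.2.1 ce.2.2
  let m := if st.1.contains key then st.1
           else st.1.insert key
             (spans (pairs.filter (fun p => !(canonPair p.1 p.2 == key))) nodes)
  (m, if m.getD key false then st.2 ++ [ce.1] else st.2)

def find_extra_channels_alt (network_data : List (List (String × String))) :
    List (List (String × String)) :=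
  let built := network_data.foldl stepB ([], [], PySem.Set.empty)
  let conns := built.1
  let pairs := built.2.1
  let nodes := built.2.2
  ((conns.zip pairs).foldl (memoStepB pairs nodes) (PySem.Dict.empty, [])).2

-- ===== PRECONDITION & SPEC =====
-- Pre_ excludes only connection records that bind the key "spy1" or "spy2" more than once:
-- such an association list represents no Python dict (dict keys are unique), so it encodes no
-- input the Python programs can receive; every real input satisfies Pre_.
def Pre_find_extra_channels (network_data : List (List (String × String))) : Prop :=
  ∀ conn ∈ network_data,
    (conn.map Prod.fst).count "spy1" ≤ 1 ∧ (conn.map Prod.fst).count "spy2" ≤ 1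
instance (network_data : List (List (String × String))) : Decidable (Pre_find_extra_channels network_data) := by unfold Pre_find_extra_channels; infer_instance
def pvWitness_find_extra_channels : (List (List (String × String))) :=
  [[("spy1", "a"), ("spy2", "b")], [("spy1", "b"), ("spy2", "c")], [("spy1", "c"), ("spy2", "a")],
   [("spy1", "c"), ("spy2", "d")]]
def Spec_find_extra_channels (network_data : List (List (String × String))) (out : List (List (String × String))) : Prop := out = find_extra_channels_alt network_data
instance (network_data : List (List (String × String))) (out : List (List (String × String))) : Decidable (Spec_find_extra_channels network_data out) := by unfold Spec_find_extra_channels; infer_instance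

-- ===== CLAIM (what is proved, stated in full; the proofs are below) =====
def Claim_equal_find_extra_channels : Prop := ∀ (network_data : List (List (String × String))), Dom_find_extra_channels network_data → Pre_find_extra_channels network_data → Spec_find_extra_channels network_data (find_extra_channels network_data)

-- ===== LEMMAS AND PROOFS =====

-- a connection is kept as an edge iff both endpoint strings are non-empty
def validB (conn : List (String × String)) : Bool :=
  (pyGetStr conn "spy1" != "") && (pyGetStr conn "spy2" != "")

-- the endpoint pair of a connection
def endsOf (conn : List (String × String)) : String × String :=
  (pyGetStr conn "spy1", pyGetStr conn "spy2")

-- the neighbour list A's graph-building loop accumulates for node n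
def nbrsOf (edges : List (List (String × String))) (n : String) : List String :=
  edges.flatMap (fun e =>
    (if pyGetStr e "spy1" = n then [pyGetStr e "spy2"] else []) ++
    (if pyGetStr e "spy2" = n then [pyGetStr e "spy1"] else []))

-- reachability along a neighbour function: the common specification both ports are reduced to
inductive ReachN (nb : String → List String) (s : String) : String → Prop
  | refl : ReachN nb s s
  | step {x y : String} : ReachN nb s x → y ∈ nb x → ReachN nb s y

lemma ReachN_trans {nb : String → List String} {a b c : String}
    (h1 : ReachN nb a b) (h2 : ReachN nb b c) : ReachN nb a c := by
  induction h2 with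
  | refl => exact h1
  | step _ hy ih => exact ReachN.step ih hy

lemma foldA_snd : ∀ (nd : List (List (String × String))) g es,
    (nd.foldl stepA (g, es)).2 = es ++ nd.filter validB := by
  intro nd
  induction nd with
  | nil => intro g es; simp
  | cons c t ih =>
    intro g es
    simp only [List.foldl_cons, List.filter_cons]
    by_cases h : validB c = true
    · have h' := h; unfold validB at h'
      simp only [stepA, h', if_true]
      rw [ih]
      simp [h]
    · have h' : (pyGetStr c "spy1" != "" && pyGetStr c "spy2" != "") = false := by
        simpa [validB] using h
      simp only [stepA, h']
      rw [ih]
      simp [h]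

lemma foldB_fst : ∀ (nd : List (List (String × String))) cs ps ns,
    (nd.foldl stepB (cs, ps, ns)).1 = cs ++ nd.filter validB := by
  intro nd
  induction nd with
  | nil => intro cs ps ns; simp
  | cons c t ih =>
    intro cs ps ns
    simp only [List.foldl_cons, List.filter_cons]
    by_cases h : validB c = true
    · have h' := h; unfold validB at h'
      simp only [stepB, h', if_true]
      rw [ih]
      simp [h]
    · have h' : (pyGetStr c "spy1" != "" && pyGetStr c "spy2" != "") = false := by
        simpa [validB] using h
      simp only [stepB, h']
      rw [ih]
      simp [h]

lemma foldB_pairs : ∀ (nd : List (List (String × String))) cs ps ns,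
    (nd.foldl stepB (cs, ps, ns)).2.1 = ps ++ (nd.filter validB).map endsOf := by
  intro nd
  induction nd with
  | nil => intro cs ps ns; simp
  | cons c t ih =>
    intro cs ps ns
    simp only [List.foldl_cons, List.filter_cons]
    by_cases h : validB c = true
    · have h' := h; unfold validB at h'
      simp only [stepB, h', if_true]
      rw [ih]
      simp [h, endsOf]
    · have h' : (pyGetStr c "spy1" != "" && pyGetStr c "spy2" != "") = false := by
        simpa [validB] using h
      simp only [stepB, h']
      rw [ih]
      simp [h]

lemma dict_contains_eq_keys_contains (g : PySem.Dict String (List String)) (u : String) :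
    g.contains u = (g.keys).contains u := by
  by_cases h : u ∈ g.keys
  · simp [h, (PySem.Dict.contains_iff_mem_keys g u).mpr h]
  · have h1 : g.contains u = false := by
      cases hc : g.contains u
      · rfl
      · exact absurd ((PySem.Dict.contains_iff_mem_keys g u).mp hc) h
    have h2 : (g.keys).contains u = false := by
      simpa using h
    rw [h1, h2]

lemma stepA_keys (g : PySem.Dict String (List String)) (es : List (List (String × String)))
    (conn : List (String × String)) (cs : List (List (String × String)))
    (ps : List (String × String)) (ns : PySem.Set String) (hk : g.keys = ns) :
    (stepA (g, es) conn).1.keys = (stepB (cs, ps, ns) conn).2.2 := by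
  by_cases h : (pyGetStr conn "spy1" != "" && pyGetStr conn "spy2" != "") = true
  · simp only [stepA, stepB, h, if_true]
    set u := pyGetStr conn "spy1"
    set v := pyGetStr conn "spy2"
    have hadd : ∀ (w : String) (d : PySem.Dict String (List String)) (s : PySem.Set String),
        d.keys = s → (if d.contains w then d else d.insert w []).keys = PySem.Set.add s w := by
      intro w d s hds
      show _ = if PySem.Set.contains s w then s else s ++ [w]
      have hsc : PySem.Set.contains s w = d.contains w := by
        rw [← hds, dict_contains_eq_keys_contains]; rfl
      rw [hsc]
      by_cases hc : d.contains w = true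
      · simp [hc, hds]
      · have hc' : d.contains w = false := by simpa using hc
        simp [hc', PySem.Dict.keys_insert_of_not_contains _ _ hc', hds]
    set d1 := if g.contains u then g else g.insert u [] with hd1
    set d2 := if d1.contains v then d1 else d1.insert v [] with hd2
    have h1 : d1.keys = PySem.Set.add ns u := hadd u g ns hk
    have h2 : d2.keys = PySem.Set.add (PySem.Set.add ns u) v := hadd v d1 _ h1
    have hc1u : d1.contains u = true := by
      by_cases hc : g.contains u = true
      · simp [hd1, hc]
      · have hc' : g.contains u = false := by simpa using hc
        simp [hd1, hc']
    have hc2u : d2.contains u = true := by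
      by_cases hc : d1.contains v = true
      · simp [hd2, hc, hc1u]
      · have hc' : d1.contains v = false := by simpa using hc
        simp [hd2, hc', PySem.Dict.contains_insert, hc1u]
    have hc2v : d2.contains v = true := by
      by_cases hc : d1.contains v = true
      · simp [hd2, hc]
      · have hc' : d1.contains v = false := by simpa using hc
        simp [hd2, hc']
    have hmodu : (d2.modify u [] (fun l => l ++ [v])).keys = d2.keys := by
      rw [PySem.Dict.keys_modify, PySem.Dict.keys_insert_of_contains _ _ hc2u]
    have hcmv : (d2.modify u [] (fun l => l ++ [v])).contains v = true := by
      rw [PySem.Dict.contains_modify]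
      simp [hc2v]
    have hmodv : ((d2.modify u [] (fun l => l ++ [v])).modify v [] (fun l => l ++ [u])).keys
        = (d2.modify u [] (fun l => l ++ [v])).keys := by
      rw [PySem.Dict.keys_modify, PySem.Dict.keys_insert_of_contains _ _ hcmv]
    rw [hmodv, hmodu, h2]
  · have h' : (pyGetStr conn "spy1" != "" && pyGetStr conn "spy2" != "") = false := by simpa using h
    simp only [stepA, stepB, h']
    exact hk

lemma foldA_keys : ∀ (nd : List (List (String × String))) g es cs ps (ns : PySem.Set String),
    g.keys = ns → (nd.foldl stepA (g, es)).1.keys = (nd.foldl stepB (cs, ps, ns)).2.2 := by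
  intro nd
  induction nd with
  | nil => intro g es cs ps ns h; simpa using h
  | cons c t ih =>
    intro g es cs ps ns h
    simp only [List.foldl_cons]
    have h1 := stepA_keys g es c cs ps ns h
    rw [show stepA (g, es) c = ((stepA (g, es) c).1, (stepA (g, es) c).2) from rfl,
        show stepB (cs, ps, ns) c
          = ((stepB (cs, ps, ns) c).1, (stepB (cs, ps, ns) c).2.1, (stepB (cs, ps, ns) c).2.2)
          from rfl]
    exact ih _ _ _ _ _ h1

lemma set_add_nodup (s : PySem.Set String) (w : String) (h : s.Nodup) :
    (PySem.Set.add s w).Nodup := by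
  show (if PySem.Set.contains s w then s else s ++ [w]).Nodup
  by_cases hm : w ∈ s
  · simp [PySem.Set.contains, hm, h]
  · simp [PySem.Set.contains, hm, List.nodup_append, h]
    exact fun a ha hh => hm (hh ▸ ha)

lemma foldA_keys_nodup : ∀ (nd : List (List (String × String))) g es,
    g.keys.Nodup → (nd.foldl stepA (g, es)).1.keys.Nodup := by
  intro nd
  induction nd with
  | nil => intro g es h; simpa using h
  | cons c t ih =>
    intro g es h
    simp only [List.foldl_cons]
    rw [show stepA (g, es) c = ((stepA (g, es) c).1, (stepA (g, es) c).2) from rfl]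
    apply ih
    rw [stepA_keys g es c [] [] g.keys rfl]
    by_cases hv : (pyGetStr c "spy1" != "" && pyGetStr c "spy2" != "") = true
    · simp only [stepB, hv, if_true]
      exact set_add_nodup _ _ (set_add_nodup _ _ h)
    · have hv' : (pyGetStr c "spy1" != "" && pyGetStr c "spy2" != "") = false := by simpa using hv
      simp only [stepB, hv']
      exact h

lemma condIns_getD (d : PySem.Dict String (List String)) (w n : String) :
    (if d.contains w then d else d.insert w []).getD n [] = d.getD n [] := by
  by_cases hc : d.contains w = true
  · simp [hc]
  · have hc' : d.contains w = false := by simpa using hc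
    simp only [hc', Bool.false_eq_true, if_false]
    rw [PySem.Dict.getD_insert]
    by_cases hn : n = w
    · subst hn; simp [PySem.Dict.getD_of_not_contains _ _ hc']
    · simp [hn]

lemma stepA_getD (g : PySem.Dict String (List String)) (es : List (List (String × String)))
    (conn : List (String × String)) (n : String)
    (hv : (pyGetStr conn "spy1" != "" && pyGetStr conn "spy2" != "") = true) :
    (stepA (g, es) conn).1.getD n [] = g.getD n [] ++
      ((if pyGetStr conn "spy1" = n then [pyGetStr conn "spy2"] else []) ++
       (if pyGetStr conn "spy2" = n then [pyGetStr conn "spy1"] else [])) := by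
  simp only [stepA, hv, if_true]
  generalize pyGetStr conn "spy1" = u
  generalize pyGetStr conn "spy2" = v
  have hg : ∀ m, ((if (if g.contains u then g else g.insert u []).contains v
      then (if g.contains u then g else g.insert u [])
      else (if g.contains u then g else g.insert u []).insert v [])).getD m []
      = g.getD m [] := by
    intro m; rw [condIns_getD, condIns_getD]
  simp only [PySem.Dict.getD_modify]
  by_cases hnv : n = v
  · subst hnv
    by_cases hnu : n = u
    · subst hnu; simp [hg]
    · have h2 : ¬ n = u := hnu
      have h3 : ¬ u = n := fun hh => hnu hh.symm
      simp [h2, h3, hg]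
  · by_cases hnu : n = u
    · subst hnu
      have h3 : ¬ v = n := fun hh => hnv (hh.symm)
      simp [hnv, h3, hg]
    · have h3 : ¬ v = n := fun hh => hnv (hh.symm)
      have h4 : ¬ u = n := fun hh => hnu (hh.symm)
      simp [hnv, hnu, h3, h4, hg]

lemma foldA_getD : ∀ (nd : List (List (String × String))) g es (n : String),
    (nd.foldl stepA (g, es)).1.getD n [] = g.getD n [] ++ nbrsOf (nd.filter validB) n := by
  intro nd
  induction nd with
  | nil => intro g es n; simp [nbrsOf]
  | cons c t ih =>
    intro g es n
    simp only [List.foldl_cons, List.filter_cons]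
    by_cases hv : validB c = true
    · have hv' : (pyGetStr c "spy1" != "" && pyGetStr c "spy2" != "") = true := by
        simpa [validB] using hv
      rw [show stepA (g, es) c = ((stepA (g, es) c).1, (stepA (g, es) c).2) from rfl]
      rw [ih, stepA_getD g es c n hv']
      simp [hv, nbrsOf, List.append_assoc]
    · have hv2 : (pyGetStr c "spy1" != "" && pyGetStr c "spy2" != "") = false := by
        simpa [validB] using hv
      simp only [stepA, hv2, Bool.false_eq_true, if_false]
      rw [ih]
      simp [hv]

lemma canon_eq_iff (a b u v : String) :
    canonPair a b = canonPair u v ↔ ((a = u ∧ b = v) ∨ (a = v ∧ b = u)) := by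
  unfold canonPair
  by_cases hab : a ≤ b <;> by_cases huv : u ≤ v <;>
    simp only [hab, huv, if_true, if_false, Prod.mk.injEq] <;> constructor
  · exact fun ⟨h1, h2⟩ => Or.inl ⟨h1, h2⟩
  · rintro (⟨rfl, rfl⟩ | ⟨rfl, rfl⟩)
    · exact ⟨rfl, rfl⟩
    · exact ⟨le_antisymm hab huv, le_antisymm huv hab⟩
  · exact fun ⟨h1, h2⟩ => Or.inr ⟨h1, h2⟩
  · rintro (⟨rfl, rfl⟩ | ⟨rfl, rfl⟩)
    · exact absurd hab huv
    · exact ⟨rfl, rfl⟩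
  · exact fun ⟨h1, h2⟩ => Or.inr ⟨h2, h1⟩
  · rintro (⟨rfl, rfl⟩ | ⟨rfl, rfl⟩)
    · exact absurd huv hab
    · exact ⟨rfl, rfl⟩
  · exact fun ⟨h1, h2⟩ => Or.inl ⟨h2, h1⟩
  · rintro (⟨rfl, rfl⟩ | ⟨rfl, rfl⟩)
    · exact ⟨rfl, rfl⟩
    · have h1 : b ≤ a := le_of_not_ge hab
      have h2 : a ≤ b := le_of_not_ge huv
      exact ⟨le_antisymm h1 h2, le_antisymm h2 h1⟩

lemma canon_comm (a b : String) : canonPair a b = canonPair b a := by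
  unfold canonPair
  by_cases hab : a ≤ b <;> by_cases hba : b ≤ a <;> simp [hab, hba]
  · exact ⟨le_antisymm hab hba, le_antisymm hba hab⟩
  · exact absurd (le_of_not_ge hab) (by simpa using hba)

lemma canon_beq_eq (a b u v : String) :
    ((a == u && b == v) || (a == v && b == u)) = (canonPair a b == canonPair u v) := by
  by_cases hc : canonPair a b = canonPair u v
  · rcases (canon_eq_iff a b u v).mp hc with ⟨rfl, rfl⟩ | ⟨rfl, rfl⟩ <;> simp [hc]
  · have hn : ¬((a = u ∧ b = v) ∨ (a = v ∧ b = u)) := fun hh => hc ((canon_eq_iff a b u v).mpr hh)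
    push Not at hn
    have h1 : ((a == u && b == v) || (a == v && b == u)) = false := by
      by_cases h1 : a = u <;> by_cases h2 : a = v <;>
        simp_all
    rw [h1]
    simp [hc]

lemma filter_nbrs (edges : List (List (String × String))) (u v n : String) :
    (nbrsOf edges n).filter (fun nb => !((n == u && nb == v) || (n == v && nb == u))) =
      nbrsOf (edges.filter (fun e =>
        !(canonPair (pyGetStr e "spy1") (pyGetStr e "spy2") == canonPair u v))) n := by
  induction edges with
  | nil => simp [nbrsOf]
  | cons e t ih =>
    simp only [nbrsOf, List.flatMap_cons, List.filter_append, List.filter_cons] at *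
    rw [ih]
    set x := pyGetStr e "spy1"
    set y := pyGetStr e "spy2"
    by_cases hk : (canonPair x y == canonPair u v) = true
    · simp only [hk, Bool.not_true, Bool.false_eq_true, if_false]
      have hp1 : (if x = n then [y] else []).filter
          (fun nb => !((n == u && nb == v) || (n == v && nb == u))) = [] := by
        by_cases hx : x = n
        · subst hx
          have hb : ((x == u && y == v) || (x == v && y == u)) = true := by
            rw [canon_beq_eq]; exact hk
          simp at hb ⊢
          try tauto
        · simp [hx]
      have hp2 : (if y = n then [x] else []).filter
          (fun nb => !((n == u && nb == v) || (n == v && nb == u))) = [] := by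
        by_cases hy : y = n
        · subst hy
          have hb : ((y == u && x == v) || (y == v && x == u)) = true := by
            rw [canon_beq_eq, ← canon_comm]; exact hk
          simp at hb ⊢
          try tauto
        · simp [hy]
      rw [hp1, hp2]
      simp
    · have hk' : (canonPair x y == canonPair u v) = false := by simpa using hk
      simp only [hk', Bool.not_false, if_true]
      have hp1 : (if x = n then [y] else []).filter
          (fun nb => !((n == u && nb == v) || (n == v && nb == u))) =
          (if x = n then [y] else []) := by
        by_cases hx : x = n
        · subst hx
          have hb : ((x == u && y == v) || (x == v && y == u)) = false := by
            rw [canon_beq_eq]; exact hk'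
          simp at hb ⊢
          try tauto
        · simp [hx]
      have hp2 : (if y = n then [x] else []).filter
          (fun nb => !((n == u && nb == v) || (n == v && nb == u))) =
          (if y = n then [x] else []) := by
        by_cases hy : y = n
        · subst hy
          have hb : ((y == u && x == v) || (y == v && x == u)) = false := by
            rw [canon_beq_eq, ← canon_comm]; exact hk'
          simp at hb ⊢
          try tauto
        · simp [hy]
      rw [hp1, hp2]
      rfl

lemma foldl_skip_eq_filter (c : String → Bool) :
    ∀ (l acc : List String),
      l.foldl (fun acc nb => if c nb then acc else acc ++ [nb]) acc =
        acc ++ l.filter (fun nb => !c nb) := by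
  intro l
  induction l with
  | nil => intro acc; simp
  | cons hd tl ih =>
    intro acc
    simp only [List.foldl_cons, List.filter_cons]
    by_cases hc : c hd = true
    · simp only [hc, if_true, Bool.not_true, Bool.false_eq_true, if_false]
      exact ih acc
    · have hc' : c hd = false := by simpa using hc
      simp only [hc', Bool.false_eq_true, if_false, Bool.not_false, if_true]
      rw [ih]
      simp

lemma tempOf_getD (graph : PySem.Dict String (List String)) (u v n : String)
    (h : graph.keys.Nodup) :
    (tempOf graph u v).getD n [] =
      (graph.getD n []).filter (fun nb => !((n == u && nb == v) || (n == v && nb == u))) := by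
  have hkeys : (graph.items.map (fun p => p.1)).Nodup := h
  have hitems : (tempOf graph u v).items =
      graph.items.map (fun p => (p.1, p.2.foldl (fun acc nb =>
        if (p.1 == u && nb == v) || (p.1 == v && nb == u) then acc
        else acc ++ [nb]) [])) := by
    rw [tempOf]
    rw [PySem.Dict.items_foldl_insert_fresh graph.items (fun p => p.1) _ PySem.Dict.empty
      (by intro a _; rfl) hkeys]
    rfl
  have htkeys : (tempOf graph u v).keys = graph.keys := by
    show (tempOf graph u v).items.map (fun p => p.1) = graph.items.map (fun p => p.1)
    rw [hitems, List.map_map]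
    rfl
  by_cases hn : n ∈ graph.keys
  · obtain ⟨p, hp, hp1⟩ := List.mem_map.mp hn
    obtain ⟨k, val⟩ := p
    simp only at hp1
    subst hp1
    have hg : graph.getD k [] = val := PySem.Dict.getD_of_mem_items _ hp h _
    have hmem : (k, val.foldl (fun acc nb =>
        if (k == u && nb == v) || (k == v && nb == u) then acc
        else acc ++ [nb]) []) ∈ (tempOf graph u v).items := by
      rw [hitems]
      exact List.mem_map_of_mem hp
    have htn : (tempOf graph u v).keys.Nodup := by rw [htkeys]; exact h
    rw [PySem.Dict.getD_of_mem_items _ hmem htn, hg]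
    rw [foldl_skip_eq_filter (fun nb => (k == u && nb == v) || (k == v && nb == u)) val []]
    simp
  · have hc1 : graph.contains n = false := by
      cases hcc : graph.contains n
      · rfl
      · exact absurd ((PySem.Dict.contains_iff_mem_keys _ _).mp hcc) hn
    have hc2 : (tempOf graph u v).contains n = false := by
      cases hcc : (tempOf graph u v).contains n
      · rfl
      · have := (PySem.Dict.contains_iff_mem_keys _ _).mp hcc
        rw [htkeys] at this
        exact absurd this hn
    rw [PySem.Dict.getD_of_not_contains _ _ hc2, PySem.Dict.getD_of_not_contains _ _ hc1]
    rfl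



lemma set_contains_false_iff (s : PySem.Set String) (x : String) :
    PySem.Set.contains s x = false ↔ x ∉ s := by
  constructor
  · intro h hm
    rw [(PySem.Set.contains_iff s x).mpr hm] at h
    cases h
  · intro hm
    cases hc : PySem.Set.contains s x
    · rfl
    · exact absurd ((PySem.Set.contains_iff s x).mp hc) hm

lemma contains_append_singleton (visited : List String) (node n : String) :
    PySem.Set.contains (visited ++ [node]) n
      = (PySem.Set.contains visited n || n == node) := by
  by_cases h : n ∈ visited ++ [node]
  · rw [(PySem.Set.contains_iff _ _).mpr h]
    rcases List.mem_append.mp h with h1 | h1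
    · rw [(PySem.Set.contains_iff _ _).mpr h1]; rfl
    · have : n = node := by simpa using h1
      simp [this]
  · rw [(set_contains_false_iff _ _).mpr h]
    have h1 : n ∉ visited := fun hh => h (List.mem_append.mpr (Or.inl hh))
    have h2 : ¬ n = node := fun hh => h (by simp [hh])
    rw [(set_contains_false_iff _ _).mpr h1]
    simp [h2]

lemma filter_sum_drop (d : String → Nat) :
    ∀ (N : List String) (visited : List String) (node : String),
      N.Nodup → node ∈ N → PySem.Set.contains visited node = false →
      ((N.filter (fun n => !PySem.Set.contains (visited ++ [node]) n)).map d).sum + d node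
        = ((N.filter (fun n => !PySem.Set.contains visited n)).map d).sum := by
  intro N
  induction N with
  | nil => intro v node _ h; cases h
  | cons h t ih =>
    intro v node hnd hmem hvn
    have hndt : t.Nodup := hnd.of_cons
    simp only [List.filter_cons]
    by_cases hh : h = node
    · subst hh
      have hnot : h ∉ t := (List.nodup_cons.mp hnd).1
      have ht : t.filter (fun n => !PySem.Set.contains (v ++ [h]) n)
          = t.filter (fun n => !PySem.Set.contains v n) := by
        apply List.filter_congr
        intro n hn
        have hne : ¬ n == h := by
          simp only [beq_iff_eq]
          exact fun he => hnot (he ▸ hn)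
        rw [contains_append_singleton]
        simp only [Bool.not_or]
        rcases Bool.eq_false_iff.mpr (fun hc : (n == h) = true => hne hc) with _
        have : (n == h) = false := by
          cases hc : (n == h)
          · rfl
          · exact absurd hc (by simpa using hne)
        rw [this]
        simp
      rw [contains_append_singleton, hvn]
      simp only [BEq.rfl, Bool.false_or, Bool.not_true, Bool.false_eq_true, if_false,
        Bool.not_false, if_true, List.map_cons, List.sum_cons, ht]
      omega
    · have hmemt : node ∈ t := by
        rcases List.mem_cons.mp hmem with h1 | h1
        · exact absurd h1.symm hh
        · exact h1
      have hsame : PySem.Set.contains (v ++ [node]) h = PySem.Set.contains v h := by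
        rw [contains_append_singleton]
        have : (h == node) = false := by
          cases hc : (h == node)
          · rfl
          · exact absurd (by simpa using hc) hh
        rw [this]
        simp
      rw [hsame]
      by_cases hvh : PySem.Set.contains v h = true
      · simp only [hvh, Bool.not_true, Bool.false_eq_true, if_false]
        exact ih v node hndt hmemt hvn
      · have hvh' : PySem.Set.contains v h = false := by simpa using hvh
        simp only [hvh', Bool.not_false, if_true, List.map_cons, List.sum_cons]
        have := ih v node hndt hmemt hvn
        omega

lemma dfs_main (g : PySem.Dict String (List String)) (N : List String)
    (hN : N.Nodup) (HN : ∀ x y, y ∈ g.getD x [] → y ∈ N) :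
    ∀ (fuel : Nat) (visited stack : List String),
    visited.Nodup → (∀ x ∈ visited, x ∈ N) → (∀ x ∈ stack, x ∈ N) →
    (∀ x ∈ visited, ∀ y ∈ g.getD x [], y ∈ visited ∨ y ∈ stack) →
    stack.length
      + ((N.filter (fun n => !PySem.Set.contains visited n)).map
          (fun n => (g.getD n []).length)).sum ≤ fuel →
    (isConnLoop g fuel visited stack).Nodup ∧
    (∀ x ∈ isConnLoop g fuel visited stack, x ∈ N) ∧
    (∀ x ∈ visited, x ∈ isConnLoop g fuel visited stack) ∧
    (∀ x ∈ stack, x ∈ isConnLoop g fuel visited stack) ∧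
    (∀ x ∈ isConnLoop g fuel visited stack, ∀ y ∈ g.getD x [],
        y ∈ isConnLoop g fuel visited stack) ∧
    (∀ x ∈ isConnLoop g fuel visited stack,
        x ∈ visited ∨ ∃ s ∈ stack, ReachN (fun n => g.getD n []) s x) := by
  intro fuel
  induction fuel with
  | zero =>
    intro visited stack hvnd hvN hsN hcl hms
    have hs : stack = [] := by
      cases stack with
      | nil => rfl
      | cons a t => simp at hms
    subst hs
    refine ⟨hvnd, hvN, fun x hx => hx, by simp, ?_, fun x hx => Or.inl hx⟩
    intro x hx y hy
    rcases hcl x hx y hy with h | h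
    · exact h
    · cases h
  | succ f ih =>
    intro visited stack hvnd hvN hsN hcl hms
    cases stack with
    | nil =>
      show (let R := visited; _ ∧ _ ∧ _ ∧ _ ∧ _ ∧ _)
      refine ⟨hvnd, hvN, fun x hx => hx, by simp, ?_, fun x hx => Or.inl hx⟩
      intro x hx y hy
      rcases hcl x hx y hy with h | h
      · exact h
      · cases h
    | cons node st =>
      have hnodeN : node ∈ N := hsN node (by simp)
      by_cases hc : PySem.Set.contains visited node = true
      · have hunf : isConnLoop g (f + 1) visited (node :: st)
            = if PySem.Set.contains visited node then isConnLoop g f visited st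
              else isConnLoop g f (PySem.Set.add visited node)
                (((g.getD node []).filter
                  (fun nb => !PySem.Set.contains (PySem.Set.add visited node) nb)).reverse ++ st) := rfl
        have hstep : isConnLoop g (f + 1) visited (node :: st) = isConnLoop g f visited st := by
          rw [hunf, if_pos hc]
        rw [hstep]
        have hms' : st.length
            + ((N.filter (fun n => !PySem.Set.contains visited n)).map
                (fun n => (g.getD n []).length)).sum ≤ f := by
          simp only [List.length_cons] at hms
          omega
        have hcl' : ∀ x ∈ visited, ∀ y ∈ g.getD x [], y ∈ visited ∨ y ∈ st := by
          intro x hx y hy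
          rcases hcl x hx y hy with h | h
          · exact Or.inl h
          · rcases List.mem_cons.mp h with h1 | h1
            · exact Or.inl (h1 ▸ (PySem.Set.contains_iff _ _).mp hc)
            · exact Or.inr h1
        obtain ⟨c1, c2, c3, c4, c5, c6⟩ :=
          ih visited st hvnd hvN (fun x hx => hsN x (by simp [hx])) hcl' hms'
        refine ⟨c1, c2, c3, ?_, c5, ?_⟩
        · intro x hx
          rcases List.mem_cons.mp hx with h1 | h1
          · exact c3 x (h1 ▸ (PySem.Set.contains_iff _ _).mp hc)
          · exact c4 x h1
        · intro x hx
          rcases c6 x hx with h | ⟨s, hs, hr⟩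
          · exact Or.inl h
          · exact Or.inr ⟨s, by simp [hs], hr⟩
      · have hc' : PySem.Set.contains visited node = false := by simpa using hc
        have hnotmem : node ∉ visited := (set_contains_false_iff _ _).mp hc'
        have hadd : PySem.Set.add visited node = visited ++ [node] :=
          PySem.Set.add_of_not_mem hnotmem
        have hunf : isConnLoop g (f + 1) visited (node :: st)
            = if PySem.Set.contains visited node then isConnLoop g f visited st
              else isConnLoop g f (PySem.Set.add visited node)
                (((g.getD node []).filter
                  (fun nb => !PySem.Set.contains (PySem.Set.add visited node) nb)).reverse ++ st) := rfl
        have hstep : isConnLoop g (f + 1) visited (node :: st)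
            = isConnLoop g f (visited ++ [node])
                (((g.getD node []).filter
                    (fun nb => !PySem.Set.contains (visited ++ [node]) nb)).reverse ++ st) := by
          rw [hunf, if_neg (by simpa using hnotmem), hadd]
        rw [hstep]
        set pushed := ((g.getD node []).filter
            (fun nb => !PySem.Set.contains (visited ++ [node]) nb)).reverse with hpushed
        have hvnd' : (visited ++ [node]).Nodup := by
          rw [← hadd]
          exact set_add_nodup _ _ hvnd
        have hvN' : ∀ x ∈ visited ++ [node], x ∈ N := by
          intro x hx
          rcases List.mem_append.mp hx with h1 | h1
          · exact hvN x h1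
          · have : x = node := by simpa using h1
            exact this ▸ hnodeN
        have hsN' : ∀ x ∈ pushed ++ st, x ∈ N := by
          intro x hx
          rcases List.mem_append.mp hx with h1 | h1
          · have : x ∈ g.getD node [] := by
              have := List.mem_reverse.mp h1
              exact (List.mem_filter.mp this).1
            exact HN node x this
          · exact hsN x (by simp [h1])
        have hcl' : ∀ x ∈ visited ++ [node], ∀ y ∈ g.getD x [],
            y ∈ visited ++ [node] ∨ y ∈ pushed ++ st := by
          intro x hx y hy
          rcases List.mem_append.mp hx with h1 | h1
          · rcases hcl x h1 y hy with h2 | h2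
            · exact Or.inl (List.mem_append.mpr (Or.inl h2))
            · rcases List.mem_cons.mp h2 with h3 | h3
              · exact Or.inl (by simp [h3])
              · exact Or.inr (List.mem_append.mpr (Or.inr h3))
          · have hxn : x = node := by simpa using h1
            rw [hxn] at hy
            by_cases hyv : PySem.Set.contains (visited ++ [node]) y = true
            · exact Or.inl ((PySem.Set.contains_iff _ _).mp hyv)
            · have hyv' : PySem.Set.contains (visited ++ [node]) y = false := by simpa using hyv
              refine Or.inr (List.mem_append.mpr (Or.inl ?_))
              rw [hpushed, List.mem_reverse, List.mem_filter]
              refine ⟨hy, ?_⟩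
              show (!PySem.Set.contains (visited ++ [node]) y) = true
              rw [hyv']
              rfl
        have hms' : (pushed ++ st).length
            + ((N.filter (fun n => !PySem.Set.contains (visited ++ [node]) n)).map
                (fun n => (g.getD n []).length)).sum ≤ f := by
          have hplen : pushed.length ≤ (g.getD node []).length := by
            rw [hpushed, List.length_reverse]
            exact List.length_filter_le _ _
          have hdrop := filter_sum_drop (fun n => (g.getD n []).length)
            N visited node hN hnodeN hc'
          simp only at hdrop
          simp only [List.length_append, List.length_cons] at hms ⊢
          omega
        obtain ⟨c1, c2, c3, c4, c5, c6⟩ := ih (visited ++ [node]) (pushed ++ st)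
          hvnd' hvN' hsN' hcl' hms'
        have hnodeR : node ∈ isConnLoop g f (visited ++ [node]) (pushed ++ st) :=
          c3 node (by simp)
        refine ⟨c1, c2, ?_, ?_, c5, ?_⟩
        · intro x hx
          exact c3 x (by simp [hx])
        · intro x hx
          rcases List.mem_cons.mp hx with h1 | h1
          · exact h1 ▸ hnodeR
          · exact c4 x (List.mem_append.mpr (Or.inr h1))
        · intro x hx
          rcases c6 x hx with h | ⟨s, hs, hr⟩
          · rcases List.mem_append.mp h with h1 | h1
            · exact Or.inl h1
            · have : x = node := by simpa using h1
              exact Or.inr ⟨node, by simp, this ▸ ReachN.refl⟩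
          · rcases List.mem_append.mp hs with h1 | h1
            · -- s was pushed: s is a neighbour of node, so node reaches s, hence x
              have hsnb : s ∈ g.getD node [] := by
                have := List.mem_reverse.mp h1
                exact (List.mem_filter.mp this).1
              have : ReachN (fun n => g.getD n []) node x :=
                ReachN_trans (ReachN.step ReachN.refl hsnb) hr
              exact Or.inr ⟨node, by simp, this⟩
            · exact Or.inr ⟨s, by simp [h1], hr⟩

lemma sum_map_add (f g : String → Nat) :
    ∀ (N : List String),
      (N.map (fun n => f n + g n)).sum = (N.map f).sum + (N.map g).sum := by
  intro N
  induction N with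
  | nil => simp
  | cons h t ih => simp [ih]; omega

lemma sum_indicator_zero (a : String) :
    ∀ (N : List String), a ∉ N →
      (N.map (fun n => if a = n then 1 else 0)).sum = 0 := by
  intro N
  induction N with
  | nil => intro _; simp
  | cons h t ih =>
    intro hna
    have h1 : ¬ a = h := fun he => hna (by simp [he])
    simp only [List.map_cons, List.sum_cons, h1, if_false]
    rw [ih (fun ht => hna (by simp [ht]))]

lemma sum_indicator_one (a : String) :
    ∀ (N : List String), N.Nodup → a ∈ N →
      (N.map (fun n => if a = n then 1 else 0)).sum = 1 := by
  intro N
  induction N with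
  | nil => intro _ h; cases h
  | cons h t ih =>
    intro hnd hmem
    by_cases he : a = h
    · subst he
      have : a ∉ t := (List.nodup_cons.mp hnd).1
      simp only [List.map_cons, List.sum_cons]
      rw [sum_indicator_zero a t this]
      simp
    · have hmt : a ∈ t := by
        rcases List.mem_cons.mp hmem with h1 | h1
        · exact absurd h1 he
        · exact h1
      simp only [List.map_cons, List.sum_cons, he, if_false]
      rw [ih hnd.of_cons hmt]

-- the total length of A's adjacency lists is twice the number of edges
lemma sum_nbrs : ∀ (F : List (List (String × String))) (N : List String),
    N.Nodup →
    (∀ e ∈ F, pyGetStr e "spy1" ∈ N ∧ pyGetStr e "spy2" ∈ N) →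
    (N.map (fun n => (nbrsOf F n).length)).sum = 2 * F.length := by
  intro F
  induction F with
  | nil => intro N _ _; simp [nbrsOf]
  | cons e t ih =>
    intro N hnd hend
    have hmap : (N.map (fun n => (nbrsOf (e :: t) n).length)).sum
        = (N.map (fun n =>
            ((if pyGetStr e "spy1" = n then 1 else 0) + (if pyGetStr e "spy2" = n then 1 else 0))
              + (nbrsOf t n).length)).sum := by
      congr 1
      apply List.map_congr_left
      intro n _
      simp only [nbrsOf, List.flatMap_cons, List.length_append]
      congr 1
      by_cases h1 : pyGetStr e "spy1" = n <;> by_cases h2 : pyGetStr e "spy2" = n <;>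
        simp [h1, h2]
    rw [hmap, sum_map_add, sum_map_add]
    obtain ⟨he1, he2⟩ := hend e (by simp)
    rw [sum_indicator_one _ N hnd he1, sum_indicator_one _ N hnd he2,
        ih N hnd (fun e' he' => hend e' (by simp [he']))]
    simp only [List.length_cons]
    omega

lemma mem_pair_parts (a b x y : String) :
    y ∈ ((if a = x then [b] else []) ++ (if b = x then [a] else []))
      ↔ ((a = x ∧ b = y) ∨ (b = x ∧ a = y)) := by
  by_cases h1 : a = x <;> by_cases h2 : b = x <;> simp [h1, h2, eq_comm] <;> tauto

lemma mem_nbrsOf (F : List (List (String × String))) (x y : String) :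
    y ∈ nbrsOf F x ↔ ∃ e ∈ F,
      ((pyGetStr e "spy1" = x ∧ pyGetStr e "spy2" = y) ∨
       (pyGetStr e "spy2" = x ∧ pyGetStr e "spy1" = y)) := by
  unfold nbrsOf
  rw [List.mem_flatMap]
  constructor
  · rintro ⟨e, he, hy⟩
    exact ⟨e, he, (mem_pair_parts _ _ _ _).mp hy⟩
  · rintro ⟨e, he, hy⟩
    exact ⟨e, he, (mem_pair_parts _ _ _ _).mpr hy⟩

-- A's connectivity test, characterised by reachability from the first node
lemma isConn_iff (g : PySem.Dict String (List String)) (N : List String)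
    (start : String) (rest : List String)
    (hN : N.Nodup) (hshape : N = start :: rest)
    (HN : ∀ x y, y ∈ g.getD x [] → y ∈ N)
    (fuel : Nat)
    (hfuel : 1 + (N.map (fun n => (g.getD n []).length)).sum ≤ fuel) :
    (isConn fuel g N = true ↔ ∀ n ∈ N, ReachN (fun n => g.getD n []) start n) := by
  have hstartN : start ∈ N := by rw [hshape]; simp
  have hms : ([start] : List String).length
      + ((N.filter (fun n => !PySem.Set.contains ([] : PySem.Set String) n)).map
          (fun n => (g.getD n []).length)).sum ≤ fuel := by
    have : N.filter (fun n => !PySem.Set.contains ([] : PySem.Set String) n) = N := by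
      apply List.filter_eq_self.mpr
      intro a _
      rfl
    rw [this]
    simpa using hfuel
  obtain ⟨c1, c2, c3, c4, c5, c6⟩ := dfs_main g N hN HN fuel [] [start]
    (by simp) (by simp) (by intro x hx; simp at hx; exact hx ▸ hstartN)
    (by intro x hx; cases hx) hms
  set R := isConnLoop g fuel [] [start] with hR
  have hstartR : start ∈ R := c4 start (by simp)
  have hRreach : ∀ x ∈ R, ReachN (fun n => g.getD n []) start x := by
    intro x hx
    rcases c6 x hx with h | ⟨s, hs, hr⟩
    · cases h
    · have : s = start := by simpa using hs
      exact this ▸ hr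
  have hreachR : ∀ x, ReachN (fun n => g.getD n []) start x → x ∈ R := by
    intro x hx
    induction hx with
    | refl => exact hstartR
    | step _ hy ihr => exact c5 _ ihr _ hy
  have hconn : isConn fuel g N = (R.length == N.length) := by
    rw [hshape]
    rfl
  rw [hconn]
  constructor
  · intro hlen n hn
    have hlen' : R.length = N.length := by simpa using hlen
    have hperm : R.Perm N := (c1.subperm c2).perm_of_length_le (le_of_eq hlen'.symm)
    exact hRreach n (hperm.mem_iff.mpr hn)
  · intro hall
    have hsub : N ⊆ R := fun n hn => hreachR n (hall n hn)
    have h1 : R.length ≤ N.length := (c1.subperm c2).length_le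
    have h2 : N.length ≤ R.length := (hN.subperm hsub).length_le
    simp [Nat.le_antisymm h1 h2]

-- the single-pair step of a saturation pass
def sstep (v : PySem.Set String) (p : String × String) : PySem.Set String :=
  if PySem.Set.contains (if PySem.Set.contains v p.1 then PySem.Set.add v p.2 else v) p.2
  then PySem.Set.add (if PySem.Set.contains v p.1 then PySem.Set.add v p.2 else v) p.1
  else (if PySem.Set.contains v p.1 then PySem.Set.add v p.2 else v)

lemma satStep_eq (pairs : List (String × String)) (v : PySem.Set String) :
    satStep pairs v = pairs.foldl sstep v := rfl

lemma add_prefix (v : PySem.Set String) (x : String) : v.IsPrefix (PySem.Set.add v x) := by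
  rw [PySem.Set.add_eq_ite]
  by_cases h : x ∈ v
  · simp [h]
  · simp [h]

lemma mem_add_iff (v : PySem.Set String) (x y : String) :
    y ∈ PySem.Set.add v x ↔ y ∈ v ∨ y = x := PySem.Set.mem_add v x y

lemma sstep_prefix (v : PySem.Set String) (p : String × String) : v.IsPrefix (sstep v p) := by
  unfold sstep
  by_cases h1 : PySem.Set.contains v p.1 = true
  · simp only [h1, if_true]
    by_cases h2 : PySem.Set.contains (PySem.Set.add v p.2) p.2 = true
    · simp only [h2, if_true]
      exact (add_prefix v p.2).trans (add_prefix _ p.1)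
    · have h2' : PySem.Set.contains (PySem.Set.add v p.2) p.2 = false := by simpa using h2
      simp only [h2', Bool.false_eq_true, if_false]
      exact add_prefix v p.2
  · have h1' : PySem.Set.contains v p.1 = false := by simpa using h1
    simp only [h1', Bool.false_eq_true, if_false]
    by_cases h2 : PySem.Set.contains v p.2 = true
    · simp only [h2, if_true]
      exact add_prefix v p.1
    · have h2' : PySem.Set.contains v p.2 = false := by simpa using h2
      simp only [h2', Bool.false_eq_true, if_false]
      exact List.prefix_refl v

lemma mem_sstep (v : PySem.Set String) (p : String × String) (x : String)
    (h : x ∈ sstep v p) : x ∈ v ∨ x = p.1 ∨ x = p.2 := by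
  unfold sstep at h
  by_cases hc1 : PySem.Set.contains v p.1 = true
  · simp only [hc1, if_true] at h
    by_cases hc2 : PySem.Set.contains (PySem.Set.add v p.2) p.2 = true
    · simp only [hc2, if_true] at h
      rcases (mem_add_iff _ _ _).mp h with h1 | h1
      · rcases (mem_add_iff _ _ _).mp h1 with h2 | h2
        · exact Or.inl h2
        · exact Or.inr (Or.inr h2)
      · exact Or.inr (Or.inl h1)
    · have hc2' : PySem.Set.contains (PySem.Set.add v p.2) p.2 = false := by simpa using hc2
      simp only [hc2', Bool.false_eq_true, if_false] at h
      rcases (mem_add_iff _ _ _).mp h with h1 | h1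
      · exact Or.inl h1
      · exact Or.inr (Or.inr h1)
  · have hc1' : PySem.Set.contains v p.1 = false := by simpa using hc1
    simp only [hc1', Bool.false_eq_true, if_false] at h
    by_cases hc2 : PySem.Set.contains v p.2 = true
    · simp only [hc2, if_true] at h
      rcases (mem_add_iff _ _ _).mp h with h1 | h1
      · exact Or.inl h1
      · exact Or.inr (Or.inl h1)
    · have hc2' : PySem.Set.contains v p.2 = false := by simpa using hc2
      simp only [hc2', Bool.false_eq_true, if_false] at h
      exact Or.inl h

lemma sstep_nodup (v : PySem.Set String) (p : String × String) (h : v.Nodup) :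
    (sstep v p).Nodup := by
  unfold sstep
  split
  · split
    · exact set_add_nodup _ _ (set_add_nodup _ _ h)
    · exact set_add_nodup _ _ h
  · split
    · exact set_add_nodup _ _ h
    · exact h

lemma sstep_sound (nb : String → List String) (start : String)
    (v : PySem.Set String) (p : String × String)
    (hadj1 : p.2 ∈ nb p.1) (hadj2 : p.1 ∈ nb p.2)
    (hv : ∀ x ∈ v, ReachN nb start x) :
    ∀ x ∈ sstep v p, ReachN nb start x := by
  intro x hx
  unfold sstep at hx
  by_cases hc1 : PySem.Set.contains v p.1 = true
  · have hp1v : p.1 ∈ v := (PySem.Set.contains_iff _ _).mp hc1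
    have hRp2 : ReachN nb start p.2 := ReachN.step (hv p.1 hp1v) hadj1
    have hv2 : ∀ y ∈ PySem.Set.add v p.2, ReachN nb start y := by
      intro y hy
      rcases (mem_add_iff _ _ _).mp hy with h1 | h1
      · exact hv y h1
      · exact h1 ▸ hRp2
    simp only [hc1, if_true] at hx
    by_cases hc2 : PySem.Set.contains (PySem.Set.add v p.2) p.2 = true
    · simp only [hc2, if_true] at hx
      rcases (mem_add_iff _ _ _).mp hx with h1 | h1
      · exact hv2 x h1
      · exact h1 ▸ ReachN.step hRp2 hadj2
    · have hc2' : PySem.Set.contains (PySem.Set.add v p.2) p.2 = false := by simpa using hc2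
      simp only [hc2', Bool.false_eq_true, if_false] at hx
      exact hv2 x hx
  · have hc1' : PySem.Set.contains v p.1 = false := by simpa using hc1
    simp only [hc1', Bool.false_eq_true, if_false] at hx
    by_cases hc2 : PySem.Set.contains v p.2 = true
    · have hp2v : p.2 ∈ v := (PySem.Set.contains_iff _ _).mp hc2
      simp only [hc2, if_true] at hx
      rcases (mem_add_iff _ _ _).mp hx with h1 | h1
      · exact hv x h1
      · exact h1 ▸ ReachN.step (hv p.2 hp2v) hadj2
    · have hc2' : PySem.Set.contains v p.2 = false := by simpa using hc2
      simp only [hc2', Bool.false_eq_true, if_false] at hx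
      exact hv x hx

lemma prefix_antisymm_len {v w : List String} (h1 : v.IsPrefix w) (h2 : w.length ≤ v.length) :
    v = w := h1.eq_of_length (Nat.le_antisymm h1.length_le h2)

lemma add_eq_self_mem {v : PySem.Set String} {x : String}
    (h : PySem.Set.add v x = v) : x ∈ v := by
  by_cases hm : x ∈ v
  · exact hm
  · rw [PySem.Set.add_of_not_mem hm] at h
    have := congrArg List.length h
    simp at this

lemma sstep_fix (v : PySem.Set String) (p : String × String) (h : sstep v p = v) :
    (p.1 ∈ v → p.2 ∈ v) ∧ (p.2 ∈ v → p.1 ∈ v) := by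
  unfold sstep at h
  constructor
  · intro h1
    have hc1 : PySem.Set.contains v p.1 = true := (PySem.Set.contains_iff _ _).mpr h1
    simp only [hc1, if_true] at h
    have hpre : (PySem.Set.add v p.2).IsPrefix v := by
      by_cases hc2 : PySem.Set.contains (PySem.Set.add v p.2) p.2 = true
      · simp only [hc2, if_true] at h
        have hpp := add_prefix (PySem.Set.add v p.2) p.1
        rw [h] at hpp
        exact hpp
      · have hc2' : PySem.Set.contains (PySem.Set.add v p.2) p.2 = false := by simpa using hc2
        simp only [hc2', Bool.false_eq_true, if_false] at h
        rw [h]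
    exact add_eq_self_mem ((prefix_antisymm_len (add_prefix v p.2) hpre.length_le).symm)
  · intro h2
    by_cases hc1 : PySem.Set.contains v p.1 = true
    · have hw : p.2 ∈ PySem.Set.add v p.2 := (mem_add_iff _ _ _).mpr (Or.inr rfl)
      have hc2 : PySem.Set.contains (PySem.Set.add v p.2) p.2 = true :=
        (PySem.Set.contains_iff _ _).mpr hw
      simp only [hc1, if_true, hc2] at h
      have hmem : p.1 ∈ PySem.Set.add (PySem.Set.add v p.2) p.1 :=
        (mem_add_iff _ _ _).mpr (Or.inr rfl)
      rw [h] at hmem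
      exact hmem
    · have hc1' : PySem.Set.contains v p.1 = false := by simpa using hc1
      have hc2 : PySem.Set.contains v p.2 = true := (PySem.Set.contains_iff _ _).mpr h2
      simp only [hc1', Bool.false_eq_true, if_false, hc2, if_true] at h
      exact add_eq_self_mem h

lemma satStep_prefix (pairs : List (String × String)) :
    ∀ (v : PySem.Set String), v.IsPrefix (satStep pairs v) := by
  induction pairs with
  | nil => intro v; exact List.prefix_refl v
  | cons p t ih =>
    intro v
    rw [satStep_eq, List.foldl_cons]
    exact (sstep_prefix v p).trans (ih (sstep v p))

lemma satStep_preserve (pairs : List (String × String)) (P : PySem.Set String → Prop)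
    (hP : ∀ v p, p ∈ pairs → P v → P (sstep v p)) :
    ∀ v, P v → P (satStep pairs v) := by
  induction pairs with
  | nil => intro v h; exact h
  | cons p t ih =>
    intro v h
    rw [satStep_eq, List.foldl_cons]
    exact ih (fun v' p' hp' => hP v' p' (by simp [hp'])) _ (hP v p (by simp) h)

lemma satStep_fix (pairs : List (String × String)) :
    ∀ (v : PySem.Set String), satStep pairs v = v →
      ∀ p ∈ pairs, (p.1 ∈ v → p.2 ∈ v) ∧ (p.2 ∈ v → p.1 ∈ v) := by
  induction pairs with
  | nil => intro v _ p hp; cases hp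
  | cons q t ih =>
    intro v hfix p hp
    rw [satStep_eq, List.foldl_cons] at hfix
    have hq : sstep v q = v := by
      have h1 : v.IsPrefix (sstep v q) := sstep_prefix v q
      have h2 : (sstep v q).IsPrefix v := by
        have hpp := satStep_prefix t (sstep v q)
        rw [satStep_eq] at hpp
        rw [hfix] at hpp
        exact hpp
      exact (prefix_antisymm_len h1 h2.length_le).symm
    rcases List.mem_cons.mp hp with h1 | h1
    · exact h1 ▸ sstep_fix v q hq
    · refine ih v ?_ p h1
      rw [satStep_eq]
      rw [hq] at hfix
      exact hfix

lemma satRun_prefix (pairs : List (String × String)) :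
    ∀ (k : Nat) (v : PySem.Set String), v.IsPrefix (satRun pairs k v) := by
  intro k
  induction k with
  | zero => intro v; exact List.prefix_refl v
  | succ n ih =>
    intro v
    show v.IsPrefix (if (satStep pairs v).length == v.length then satStep pairs v
      else satRun pairs n (satStep pairs v))
    split
    · exact satStep_prefix pairs v
    · exact (satStep_prefix pairs v).trans (ih (satStep pairs v))

lemma satRun_preserve (pairs : List (String × String)) (P : PySem.Set String → Prop)
    (hP : ∀ v, P v → P (satStep pairs v)) :
    ∀ (k : Nat) (v : PySem.Set String), P v → P (satRun pairs k v) := by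
  intro k
  induction k with
  | zero => intro v h; exact h
  | succ n ih =>
    intro v h
    show P (if (satStep pairs v).length == v.length then satStep pairs v
      else satRun pairs n (satStep pairs v))
    split
    · exact hP v h
    · exact ih (satStep pairs v) (hP v h)

lemma satRun_fix (pairs : List (String × String)) (N : List String)
    (HPN : ∀ p ∈ pairs, p.1 ∈ N ∧ p.2 ∈ N) :
    ∀ (k : Nat) (v : PySem.Set String), v.Nodup → (∀ x ∈ v, x ∈ N) →
      N.length + 1 ≤ k + v.length →
      satStep pairs (satRun pairs k v) = satRun pairs k v := by
  intro k
  induction k with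
  | zero =>
    intro v hnd hsub hlen
    have : v.length ≤ N.length := (hnd.subperm (fun x hx => hsub x hx)).length_le
    omega
  | succ n ih =>
    intro v hnd hsub hlen
    show satStep pairs (if (satStep pairs v).length == v.length then satStep pairs v
        else satRun pairs n (satStep pairs v))
      = (if (satStep pairs v).length == v.length then satStep pairs v
        else satRun pairs n (satStep pairs v))
    by_cases hb : ((satStep pairs v).length == v.length) = true
    · have hl : v.length = (satStep pairs v).length := by
        have := (beq_iff_eq).mp hb
        omega
      have heq : satStep pairs v = v := ((satStep_prefix pairs v).eq_of_length hl).symm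
      simp only [hb, if_true]
      rw [heq]
      exact heq
    · have hb' : ((satStep pairs v).length == v.length) = false := by simpa using hb
      simp only [hb', Bool.false_eq_true, if_false]
      have hle : v.length ≤ (satStep pairs v).length := (satStep_prefix pairs v).length_le
      have hne : (satStep pairs v).length ≠ v.length := by simpa using hb
      have hlt : v.length < (satStep pairs v).length := lt_of_le_of_ne hle (fun h => hne h.symm)
      have hnd' : (satStep pairs v).Nodup :=
        satStep_preserve pairs List.Nodup (fun v' p' _ h => sstep_nodup v' p' h) v hnd
      have hsub' : ∀ x ∈ satStep pairs v, x ∈ N :=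
        satStep_preserve pairs (fun w => ∀ x ∈ w, x ∈ N)
          (fun v' p' hp' hss x hx => by
            rcases mem_sstep v' p' x hx with h1 | h1 | h1
            · exact hss x h1
            · exact h1 ▸ (HPN p' hp').1
            · exact h1 ▸ (HPN p' hp').2) v hsub
      exact ih (satStep pairs v) hnd' hsub' (by omega)

-- B's saturation test, characterised by reachability from the first node
lemma spans_iff (pairs : List (String × String)) (N : List String)
    (n0 : String) (rest : List String) (nb : String → List String)
    (hshape : N = n0 :: rest)
    (HPN : ∀ p ∈ pairs, p.1 ∈ N ∧ p.2 ∈ N)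
    (Hadj : ∀ x y, y ∈ nb x ↔ ∃ p ∈ pairs, (p.1 = x ∧ p.2 = y) ∨ (p.2 = x ∧ p.1 = y)) :
    (spans pairs N = true ↔ ∀ n ∈ N, ReachN nb n0 n) := by
  have hn0 : n0 ∈ N := by rw [hshape]; simp
  have hv0 : PySem.Set.add PySem.Set.empty n0 = [n0] := by
    rw [PySem.Set.add_eq_ite]
    simp [PySem.Set.empty]
  set R := satRun pairs N.length (PySem.Set.add PySem.Set.empty n0) with hR
  have hn0R : n0 ∈ R := by
    rw [hR, hv0]
    exact (satRun_prefix pairs N.length [n0]).subset (by simp)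
  have hsound : ∀ x ∈ R, ReachN nb n0 x := by
    rw [hR, hv0]
    refine satRun_preserve pairs (fun w => ∀ x ∈ w, ReachN nb n0 x) ?_ N.length [n0] ?_
    · intro v hv
      refine satStep_preserve pairs (fun w => ∀ x ∈ w, ReachN nb n0 x) ?_ v hv
      intro v' p' hp' h
      exact sstep_sound nb n0 v' p'
        ((Hadj p'.1 p'.2).mpr ⟨p', hp', Or.inl ⟨rfl, rfl⟩⟩)
        ((Hadj p'.2 p'.1).mpr ⟨p', hp', Or.inr ⟨rfl, rfl⟩⟩) h
    · intro x hx
      have hx0 : x = n0 := by simpa using hx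
      exact hx0 ▸ ReachN.refl
  have hfix : satStep pairs R = R := by
    rw [hR, hv0]
    exact satRun_fix pairs N HPN N.length [n0] (by simp)
      (by
        intro x hx
        have hx0 : x = n0 := by simpa using hx
        exact hx0 ▸ hn0) (by simp)
  have hclosed : ∀ x ∈ R, ∀ y ∈ nb x, y ∈ R := by
    intro x hx y hy
    rcases (Hadj x y).mp hy with ⟨p, hp, hor⟩
    have himp := satStep_fix pairs R hfix p hp
    rcases hor with ⟨h1, h2⟩ | ⟨h1, h2⟩
    · exact h2 ▸ himp.1 (h1 ▸ hx)
    · exact h2 ▸ himp.2 (h1 ▸ hx)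
  have hcomplete : ∀ x, ReachN nb n0 x → x ∈ R := by
    intro x hx
    induction hx with
    | refl => exact hn0R
    | step _ hy ihr => exact hclosed _ ihr _ hy
  have hspans : spans pairs N = N.all (fun n => PySem.Set.contains R n) := by
    rw [hR, hshape]
    rfl
  rw [hspans, List.all_eq_true]
  constructor
  · intro hall n hn
    exact hsound n ((PySem.Set.contains_iff _ _).mp (hall n hn))
  · intro hall n hn
    exact (PySem.Set.contains_iff _ _).mpr (hcomplete n (hall n hn))

lemma foldB_nodes_mono : ∀ (nd : List (List (String × String)))
    (st : List (List (String × String)) × List (String × String) × PySem.Set String)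
    (x : String), x ∈ st.2.2 → x ∈ (nd.foldl stepB st).2.2 := by
  intro nd
  induction nd with
  | nil => intro st x h; exact h
  | cons c t ih =>
    intro st x h
    simp only [List.foldl_cons]
    refine ih _ x ?_
    by_cases hv : (pyGetStr c "spy1" != "" && pyGetStr c "spy2" != "") = true
    · simp only [stepB, hv, if_true]
      exact (mem_add_iff _ _ _).mpr (Or.inl ((mem_add_iff _ _ _).mpr (Or.inl h)))
    · have hv' : (pyGetStr c "spy1" != "" && pyGetStr c "spy2" != "") = false := by simpa using hv
      simp only [stepB, hv', Bool.false_eq_true, if_false]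
      exact h

lemma foldB_nodes_end : ∀ (nd : List (List (String × String)))
    (st : List (List (String × String)) × List (String × String) × PySem.Set String)
    (e : List (String × String)), e ∈ nd → validB e = true →
    pyGetStr e "spy1" ∈ (nd.foldl stepB st).2.2 ∧
    pyGetStr e "spy2" ∈ (nd.foldl stepB st).2.2 := by
  intro nd
  induction nd with
  | nil => intro st e h; cases h
  | cons c t ih =>
    intro st e hmem hv
    simp only [List.foldl_cons]
    rcases List.mem_cons.mp hmem with h1 | h1
    · subst h1
      have hv' : (pyGetStr e "spy1" != "" && pyGetStr e "spy2" != "") = true := by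
        simpa [validB] using hv
      constructor
      · refine foldB_nodes_mono t _ _ ?_
        simp only [stepB, hv', if_true]
        exact (mem_add_iff _ _ _).mpr (Or.inl ((mem_add_iff _ _ _).mpr (Or.inr rfl)))
      · refine foldB_nodes_mono t _ _ ?_
        simp only [stepB, hv', if_true]
        exact (mem_add_iff _ _ _).mpr (Or.inr rfl)
    · exact ih _ e h1 hv

lemma zip_self_map {α β : Type} (f : α → β) :
    ∀ (l : List α), l.zip (l.map f) = l.map (fun a => (a, f a)) := by
  intro l
  induction l with
  | nil => rfl
  | cons a t ih => simp [ih]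

-- the memo dict always stores exactly B's per-canonical-key saturation result
lemma memo_fold (pairs : List (String × String)) (nodes : PySem.Set String) :
    ∀ (l : List (List (String × String) × String × String))
      (m : PySem.Dict (String × String) Bool) (out : List (List (String × String))),
    (∀ c b, m.get? c = some b →
      b = spans (pairs.filter (fun p => !(canonPair p.1 p.2 == c))) nodes) →
    (l.foldl (memoStepB pairs nodes) (m, out)).2
      = out ++ (l.filter (fun ce =>
          spans (pairs.filter
            (fun p => !(canonPair p.1 p.2 == canonPair ce.2.1 ce.2.2))) nodes)).map
          (fun ce => ce.1) := by
  intro l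
  induction l with
  | nil => intro m out _; simp
  | cons ce t ih =>
    intro m out hinv
    simp only [List.foldl_cons, List.filter_cons]
    set key := canonPair ce.2.1 ce.2.2 with hkey
    set sval := spans (pairs.filter (fun p => !(canonPair p.1 p.2 == key))) nodes with hsval
    have hstep : memoStepB pairs nodes (m, out) ce
        = (if m.contains key then m else m.insert key sval,
           if (if m.contains key then m else m.insert key sval).getD key false
           then out ++ [ce.1] else out) := rfl
    by_cases hc : m.contains key = true
    · have hsome : ∃ b, m.get? key = some b := by
        rw [PySem.Dict.contains_eq_isSome_get?] at hc
        exact Option.isSome_iff_exists.mp hc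
      obtain ⟨b, hb⟩ := hsome
      have hbval : b = sval := hinv key b hb
      have hget : m.getD key false = sval := by
        rw [PySem.Dict.getD_eq_get?_getD, hb]
        exact hbval
      rw [hstep]
      simp only [hc, if_true, hget]
      rw [ih m _ hinv]
      by_cases hs : sval = true
      · simp only [hs, if_true]
        simp
      · have hs' : sval = false := by simpa using hs
        simp only [hs', Bool.false_eq_true, if_false]
    · have hc' : m.contains key = false := by simpa using hc
      have hget : (m.insert key sval).getD key false = sval :=
        PySem.Dict.getD_insert_self m key sval false
      have hinv' : ∀ c b, (m.insert key sval).get? c = some b →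
          b = spans (pairs.filter (fun p => !(canonPair p.1 p.2 == c))) nodes := by
        intro c b hb
        rw [PySem.Dict.get?_insert] at hb
        by_cases hck : c = key
        · rw [if_pos hck] at hb
          cases hb
          rw [hck]
        · rw [if_neg hck] at hb
          exact hinv c b hb
      rw [hstep]
      simp only [hc', Bool.false_eq_true, if_false, hget]
      rw [ih _ _ hinv']
      by_cases hs : sval = true
      · simp only [hs, if_true]
        simp
      · have hs' : sval = false := by simpa using hs
        simp only [hs', Bool.false_eq_true, if_false]

theorem find_extra_channels_spec_main :
    ∀ (network_data : List (List (String × String))),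
      find_extra_channels network_data = find_extra_channels_alt network_data := by
  intro nd
  by_cases hnd : nd = []
  · subst hnd; rfl
  · rw [find_extra_channels, if_neg hnd, find_extra_channels_alt]
    have hE : (nd.foldl stepA (PySem.Dict.empty, [])).2 = nd.filter validB := by
      rw [foldA_snd]; rfl
    have hconns : (nd.foldl stepB ([], [], PySem.Set.empty)).1 = nd.filter validB := by
      rw [foldB_fst]; rfl
    have hpairs : (nd.foldl stepB ([], [], PySem.Set.empty)).2.1
        = (nd.filter validB).map endsOf := by
      rw [foldB_pairs]; rfl
    by_cases hE0 : (nd.foldl stepA (PySem.Dict.empty, [])).2 = []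
    · rw [if_pos hE0]
      have hEnil : nd.filter validB = [] := by rw [← hE]; exact hE0
      rw [hconns, hEnil]
      rfl
    · rw [if_neg hE0]
      set graph := (nd.foldl stepA (PySem.Dict.empty, [])).1 with hgraph
      set N := (nd.foldl stepB ([], [], PySem.Set.empty)).2.2 with hNdef
      set E := nd.filter validB with hEdef
      rw [hE, hconns, hpairs]
      have hkeysN : graph.keys = N :=
        foldA_keys nd PySem.Dict.empty [] [] [] PySem.Set.empty rfl
      have hkeysnodup : graph.keys.Nodup :=
        foldA_keys_nodup nd PySem.Dict.empty [] PySem.Dict.nodup_keys_empty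
      have hNnodup : N.Nodup := hkeysN ▸ hkeysnodup
      have hofList : PySem.Set.ofList graph.keys = N := by
        rw [PySem.Set.ofList_eq_self_of_nodup _ hkeysnodup, hkeysN]
      rw [hofList]
      have hend : ∀ e ∈ E, pyGetStr e "spy1" ∈ N ∧ pyGetStr e "spy2" ∈ N := by
        intro e he
        have hmem := List.mem_filter.mp (hEdef ▸ he)
        exact foldB_nodes_end nd ([], [], PySem.Set.empty) e hmem.1 hmem.2
      have hEne : E ≠ [] := fun h => hE0 (by rw [hE, h])
      have hNne : N ≠ [] := by
        obtain ⟨e, he⟩ := List.exists_mem_of_ne_nil E hEne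
        intro hN0
        have := (hend e he).1
        rw [hN0] at this
        cases this
      obtain ⟨n0, rest, hshape⟩ := List.exists_cons_of_ne_nil hNne
      -- A's loop is a filter
      rw [PySem.List.foldl_append_if
        (fun edge => isConn (2 * E.length + 2)
          (tempOf graph (pyGetStr edge "spy1") (pyGetStr edge "spy2")) N)
        (fun edge => edge)]
      simp only [List.map_id_fun', id, List.nil_append]
      -- B's loop is the same filter, via the memo lemma
      rw [zip_self_map endsOf E]
      rw [memo_fold (E.map endsOf) N (E.map (fun e => (e, endsOf e))) PySem.Dict.empty []
        (by intro c b hb; rw [PySem.Dict.get?_empty] at hb; cases hb)]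
      rw [List.filter_map, List.map_map]
      simp only [List.nil_append]
      have hmapid : ∀ (l : List (List (String × String))),
          l.map ((fun ce : List (String × String) × String × String => ce.1)
            ∘ (fun e => (e, endsOf e))) = l := by
        intro l
        induction l with
        | nil => rfl
        | cons a t ih => simp [ih]
      rw [hmapid]
      apply List.filter_congr
      intro e he
      show isConn (2 * E.length + 2)
            (tempOf graph (pyGetStr e "spy1") (pyGetStr e "spy2")) N
          = spans ((E.map endsOf).filter (fun p => !(canonPair p.1 p.2
              == canonPair (pyGetStr e "spy1") (pyGetStr e "spy2")))) N
      -- per-edge core: DFS connectivity test = saturation test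
      have hpairsF : (E.map endsOf).filter
            (fun p => !(canonPair p.1 p.2
              == canonPair (pyGetStr e "spy1") (pyGetStr e "spy2")))
          = (E.filter (fun e' => !(canonPair (pyGetStr e' "spy1") (pyGetStr e' "spy2")
              == canonPair (pyGetStr e "spy1") (pyGetStr e "spy2")))).map endsOf := by
        rw [List.filter_map]
        rfl
      set F := E.filter (fun e' => !(canonPair (pyGetStr e' "spy1") (pyGetStr e' "spy2")
          == canonPair (pyGetStr e "spy1") (pyGetStr e "spy2"))) with hF
      have hgetD : ∀ n,
          (tempOf graph (pyGetStr e "spy1") (pyGetStr e "spy2")).getD n [] = nbrsOf F n := by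
        intro n
        rw [tempOf_getD _ _ _ _ hkeysnodup]
        have hgd : graph.getD n [] = nbrsOf E n := by
          rw [hgraph, foldA_getD, hEdef]
          rfl
        rw [hgd, filter_nbrs]
      have hFsub : ∀ e' ∈ F, e' ∈ E := by
        intro e' he'
        exact (List.mem_filter.mp (hF ▸ he')).1
      have HN : ∀ x y, y ∈ nbrsOf F x → y ∈ N := by
        intro x y hy
        rcases (mem_nbrsOf F x y).mp hy with ⟨e', he', hor⟩
        rcases hor with ⟨_, h2⟩ | ⟨_, h2⟩
        · exact h2 ▸ (hend e' (hFsub e' he')).2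
        · exact h2 ▸ (hend e' (hFsub e' he')).1
      have HPN : ∀ p ∈ F.map endsOf, p.1 ∈ N ∧ p.2 ∈ N := by
        intro p hp
        obtain ⟨e', he', rfl⟩ := List.mem_map.mp hp
        exact ⟨(hend e' (hFsub e' he')).1, (hend e' (hFsub e' he')).2⟩
      have Hadj : ∀ x y, y ∈ nbrsOf F x ↔ ∃ p ∈ F.map endsOf,
          (p.1 = x ∧ p.2 = y) ∨ (p.2 = x ∧ p.1 = y) := by
        intro x y
        rw [mem_nbrsOf]
        constructor
        · rintro ⟨e', he', hor⟩
          exact ⟨endsOf e', List.mem_map_of_mem he', hor⟩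
        · rintro ⟨p, hp, hor⟩
          obtain ⟨e', he', rfl⟩ := List.mem_map.mp hp
          exact ⟨e', he', hor⟩
      have hFend : ∀ e' ∈ F, pyGetStr e' "spy1" ∈ N ∧ pyGetStr e' "spy2" ∈ N :=
        fun e' he' => hend e' (hFsub e' he')
      have hfuel : 1 + (N.map (fun n =>
          ((tempOf graph (pyGetStr e "spy1") (pyGetStr e "spy2")).getD n []).length)).sum
          ≤ 2 * E.length + 2 := by
        have hmapeq : N.map (fun n =>
            ((tempOf graph (pyGetStr e "spy1") (pyGetStr e "spy2")).getD n []).length)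
            = N.map (fun n => (nbrsOf F n).length) :=
          List.map_congr_left (fun n _ => by rw [hgetD])
        rw [hmapeq, sum_nbrs F N hNnodup hFend]
        have hFle : F.length ≤ E.length := by
          rw [hF]
          exact List.length_filter_le _ _
        omega
      have hiso := isConn_iff (tempOf graph (pyGetStr e "spy1") (pyGetStr e "spy2")) N
        n0 rest hNnodup hshape
        (fun x y hy => HN x y (hgetD x ▸ hy)) (2 * E.length + 2) hfuel
      have hreach_eq : (fun n =>
          (tempOf graph (pyGetStr e "spy1") (pyGetStr e "spy2")).getD n [])
          = (fun n => nbrsOf F n) := funext hgetD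
      rw [hreach_eq] at hiso
      have hspa := spans_iff (F.map endsOf) N n0 rest (fun n => nbrsOf F n)
        hshape HPN Hadj
      rw [hpairsF]
      have hiff : (isConn (2 * E.length + 2)
            (tempOf graph (pyGetStr e "spy1") (pyGetStr e "spy2")) N = true)
          ↔ (spans (F.map endsOf) N = true) := hiso.trans hspa.symm
      by_cases hA : isConn (2 * E.length + 2)
          (tempOf graph (pyGetStr e "spy1") (pyGetStr e "spy2")) N = true
      · rw [hA, hiff.mp hA]
      · have hA' : isConn (2 * E.length + 2)
            (tempOf graph (pyGetStr e "spy1") (pyGetStr e "spy2")) N = false := by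
          simpa using hA
        have hB' : spans (F.map endsOf) N = false := by
          cases hBv : spans (F.map endsOf) N
          · rfl
          · exact absurd (hiff.mpr hBv) hA
        rw [hA', hB']

-- ===== VERDICT (by name: the statement is the Claim_ definition above) =====
theorem find_extra_channels_spec : Claim_equal_find_extra_channels := by
  intro network_data _ _
  unfold Spec_find_extra_channels
  exact find_extra_channels_spec_main network_data
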